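-- pv_equiv track=rewrite | github.com/michaelkamprath/bespokeasm | src/bespokeasm/configgen/sublime/resources/bespokeasm_hover.py | _get_code_regions
-- ===== SOURCE A (Python) =====
-- def _get_code_regions(text):
--     ranges = []
--     segment_start = 0
--     in_quote = None
--     escaped = False
--
--     for idx, ch in enumerate(text):
--         if in_quote is not None:
--             if escaped:
--                 escaped = False
--             elif ch == '\\':
--                 escaped = True
--             elif ch == in_quote:
--                 in_quote = None
--                 segment_start = idx + 1
--             continue
--
--         if ch in ('"', "'"):
--             if segment_start < idx:
--                 ranges.append((segment_start, idx))
--             in_quote = ch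
--             continue
--
--         if ch == ';':
--             if segment_start < idx:
--                 ranges.append((segment_start, idx))
--             return ranges
--
--     if in_quote is None and segment_start < len(text):
--         ranges.append((segment_start, len(text)))
--     return ranges
-- ===== SOURCE B (Python) =====
-- def _get_code_regions(text):
--     n = len(text)
--     ranges = []
--     segment_start = 0
--     i = 0
--     while i < n:
--         ch = text[i]
--         if ch == '"' or ch == "'":
--             if segment_start < i:
--                 ranges.append((segment_start, i))
--             j = i + 1
--             while j < n:
--                 cj = text[j]
--                 if cj == '\\':
--                     j += 2
--                 elif cj == ch:
--                     break
--                 else: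
--                     j += 1
--             if j >= n:
--                 return ranges  # unterminated quote: no trailing region
--             segment_start = j + 1
--             i = j + 1
--         elif ch == ';':
--             if segment_start < i:
--                 ranges.append((segment_start, i))
--             return ranges
--         else:
--             i += 1
--     if segment_start < n:
--         ranges.append((segment_start, n))
--     return ranges
-- ===== Notes on version B (the rewrite author's own statement) =====
-- stated objective: alternative
-- what changed: Replaced A's single character-at-a-time state machine (in_quote/escaped flags threaded through one enumerate loop) with a two-level index scanner: an outer while loop over code positions that, on a quote, hands off to an inner loop that jumps past escaped pairs until the closing quote, then resumes after it.
import Mathlib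
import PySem

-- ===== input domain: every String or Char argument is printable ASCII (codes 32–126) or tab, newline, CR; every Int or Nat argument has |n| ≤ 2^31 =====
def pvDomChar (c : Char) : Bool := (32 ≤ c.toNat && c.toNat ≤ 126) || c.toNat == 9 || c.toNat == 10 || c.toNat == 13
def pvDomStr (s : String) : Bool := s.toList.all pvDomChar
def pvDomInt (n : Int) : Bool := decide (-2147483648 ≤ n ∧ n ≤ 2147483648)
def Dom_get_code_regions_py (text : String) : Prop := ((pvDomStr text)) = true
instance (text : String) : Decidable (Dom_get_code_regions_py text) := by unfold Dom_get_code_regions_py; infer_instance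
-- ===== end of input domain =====

-- B replaces A's flag-based state machine with a two-level index scanner (outer code loop + inner quote-skip loop); alternative decomposition, same O(n) cost.


-- ===== PORT A =====
-- structural recursion over the remaining characters with the running index,
-- carrying A's state (ranges, segment_start, in_quote, escaped); branch order as in A.
def aLoop (cs : List Char) (idx : Nat) (segStart : Nat) (inQuote : Option Char)
    (escaped : Bool) (ranges : List (Int × Int)) (n : Nat) : List (Int × Int) :=
  match cs with
  | [] =>
    if inQuote = none ∧ segStart < n then ranges ++ [((segStart : Int), (n : Int))] else ranges
  | ch :: rest =>
    match inQuote with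
    | some q =>
      if escaped then aLoop rest (idx+1) segStart (some q) false ranges n
      else if ch = '\\' then aLoop rest (idx+1) segStart (some q) true ranges n
      else if ch = q then aLoop rest (idx+1) (idx+1) none false ranges n
      else aLoop rest (idx+1) segStart (some q) false ranges n
    | none =>
      if ch = '"' ∨ ch = '\'' then
        aLoop rest (idx+1) segStart (some ch) escaped
          (if segStart < idx then ranges ++ [((segStart : Int), (idx : Int))] else ranges) n
      else if ch = ';' then
        if segStart < idx then ranges ++ [((segStart : Int), (idx : Int))] else ranges
      else aLoop rest (idx+1) segStart none escaped ranges n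

def get_code_regions_py (text : String) : List (Int × Int) :=
  aLoop text.toList 0 0 none false [] text.toList.length

-- ===== PORT B =====
-- inner loop: from j, skip escaped pairs until the closing quote q (or off the end)
def altSkip (cs : List Char) (q : Char) (j : Nat) : Nat :=
  if h : j < cs.length then
    if cs[j] = '\\' then altSkip cs q (j+2)
    else if cs[j] = q then j
    else altSkip cs q (j+1)
  else j
termination_by cs.length - j

theorem altSkip_ge (cs : List Char) (q : Char) (j : Nat) : j ≤ altSkip cs q j := by
  fun_induction altSkip cs q j <;> omega

-- outer loop: i scans code; on a quote emit the pending region and jump past the quote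
def altLoop (cs : List Char) (i : Nat) (segStart : Nat) (acc : List (Int × Int)) :
    List (Int × Int) :=
  if h : i < cs.length then
    let ch := cs[i]
    if ch = '"' ∨ ch = '\'' then
      let acc' := if segStart < i then acc ++ [((segStart : Int), (i : Int))] else acc
      let j := altSkip cs ch (i+1)
      if cs.length ≤ j then acc'
      else altLoop cs (j+1) (j+1) acc'
    else if ch = ';' then
      if segStart < i then acc ++ [((segStart : Int), (i : Int))] else acc
    else altLoop cs (i+1) segStart acc
  else
    if segStart < cs.length then acc ++ [((segStart : Int), (cs.length : Int))] else acc
termination_by cs.length - i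
decreasing_by
  · have := altSkip_ge cs cs[i] (i+1); omega
  · omega

def get_code_regions_py_alt (text : String) : List (Int × Int) :=
  altLoop text.toList 0 0 []

-- ===== PRECONDITION & SPEC =====
def Spec_get_code_regions_py (text : String) (out : List (Int × Int)) : Prop := out = get_code_regions_py_alt text
instance (text : String) (out : List (Int × Int)) : Decidable (Spec_get_code_regions_py text out) := by unfold Spec_get_code_regions_py; infer_instance

-- ===== CLAIM (what is proved, stated in full; the proofs are below) =====
def Claim_equal_get_code_regions_py : Prop := ∀ (text : String), Dom_get_code_regions_py text → Spec_get_code_regions_py text (get_code_regions_py text)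

-- ===== LEMMAS AND PROOFS =====

-- A's in-quote stepping from position j (escaped = false) equals B's altSkip jump.
theorem aLoop_quote (cs : List Char) (q : Char) (j : Nat) (segStart : Nat)
    (ranges : List (Int × Int)) :
    aLoop (cs.drop j) j segStart (some q) false ranges cs.length =
      (if cs.length ≤ altSkip cs q j then ranges
       else aLoop (cs.drop (altSkip cs q j + 1)) (altSkip cs q j + 1)
              (altSkip cs q j + 1) none false ranges cs.length) := by
  fun_induction altSkip cs q j generalizing segStart with
  | case1 j h hbs ih =>
    rw [List.drop_eq_getElem_cons h]
    by_cases h2 : j + 1 < cs.length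
    · rw [show cs.drop (j+1) = cs[j+1] :: cs.drop (j+2) from List.drop_eq_getElem_cons h2]
      simp only [aLoop, hbs, if_true, Bool.false_eq_true, if_false]
      exact ih segStart
    · have hd : cs.drop (j+1) = [] := List.drop_eq_nil_of_le (by omega)
      have hs : altSkip cs q (j+2) = j + 2 := by
        unfold altSkip; rw [dif_neg (by omega)]
      simp [aLoop, hbs, hd, hs]
      omega
  | case2 j h hbs hq =>
    have hnq : ¬ q = '\\' := fun e => hbs (hq.trans e)
    rw [List.drop_eq_getElem_cons h]
    simp [aLoop, hq, hnq, Nat.not_le.mpr h]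
  | case3 j h hbs hq ih =>
    rw [List.drop_eq_getElem_cons h]
    simp only [aLoop, hbs, hq, Bool.false_eq_true, if_false]
    exact ih segStart
  | case4 j h =>
    have hd : cs.drop j = [] := List.drop_eq_nil_of_le (by omega)
    simp [aLoop, hd]
    omega

-- Main loop correspondence in code (non-quote) state, by fuel induction on the tail length.
theorem aLoop_eq_altLoop_aux (cs : List Char) (k : Nat) :
    ∀ (i segStart : Nat) (acc : List (Int × Int)), cs.length ≤ i + k →
    aLoop (cs.drop i) i segStart none false acc cs.length = altLoop cs i segStart acc := by
  induction k with
  | zero =>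
    intro i segStart acc hk
    have hd : cs.drop i = [] := List.drop_eq_nil_of_le (by omega)
    rw [altLoop, dif_neg (by omega)]
    simp [aLoop, hd]
  | succ k ih =>
    intro i segStart acc hk
    by_cases h : i < cs.length
    · rw [List.drop_eq_getElem_cons h, altLoop]
      simp only [aLoop, dif_pos h]
      by_cases hq : cs[i] = '"' ∨ cs[i] = '\''
      · rw [if_pos hq, if_pos hq]
        rw [aLoop_quote cs cs[i] (i+1) segStart _]
        by_cases hend : cs.length ≤ altSkip cs cs[i] (i+1)
        · rw [if_pos hend, if_pos hend]
        · rw [if_neg hend, if_neg hend]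
          exact ih _ _ _ (by have := altSkip_ge cs cs[i] (i+1); omega)
      · rw [if_neg hq, if_neg hq]
        by_cases hs : cs[i] = ';'
        · rw [if_pos hs, if_pos hs]
        · rw [if_neg hs, if_neg hs]
          exact ih _ _ _ (by omega)
    · have hd : cs.drop i = [] := List.drop_eq_nil_of_le (by omega)
      rw [altLoop, dif_neg h]
      simp [aLoop, hd]

theorem aLoop_eq_altLoop (cs : List Char) (i segStart : Nat) (acc : List (Int × Int)) :
    aLoop (cs.drop i) i segStart none false acc cs.length = altLoop cs i segStart acc :=
  aLoop_eq_altLoop_aux cs cs.length i segStart acc (by omega)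

-- ===== VERDICT (by name: the statement is the Claim_ definition above) =====
theorem get_code_regions_py_spec : Claim_equal_get_code_regions_py := by
  intro text _
  unfold Spec_get_code_regions_py get_code_regions_py get_code_regions_py_alt
  simpa using aLoop_eq_altLoop text.toList 0 0 []
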